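-- pv_equiv track=rewrite | github.com/myamaak/Algorithms | [프로그래머스] 더 맵게.py | solution
-- ===== SOURCE A (Python) =====
-- def solution(scoville, K):
--     answer = 0
--     scoville.sort()
--
--     while len(scoville)>=2 and scoville[0] <K:
--         min1,min2 = scoville[:2]
--         scoville = scoville[2:]
--         scoville.append(min1+min2*2)
--         scoville.sort() #sort를 while문 안에서 계속 반복하느라 시간초과가 생긴다.
--         answer+=1
--     if scoville[0] < K:
--         return -1
--     return answer
-- ===== SOURCE B (Python) =====
-- # Leftist min-heap (persistent tuple tree) instead of re-sorting a list each merge.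
-- def _rank(t):
--     return t[0] if t is not None else 0
--
-- def _merge(a, b):
--     if a is None:
--         return b
--     if b is None:
--         return a
--     if b[1] < a[1]:
--         a, b = b, a
--     left = a[2]
--     right = _merge(a[3], b)
--     if _rank(left) >= _rank(right):
--         return (_rank(right) + 1, a[1], left, right)
--     return (_rank(left) + 1, a[1], right, left)
--
-- def solution(scoville, K):
--     heap = None
--     for x in scoville:
--         heap = _merge(heap, (1, x, None, None))
--     n = len(scoville)
--     answer = 0
--     while n >= 2 and heap[1] < K:
--         a = heap[1]
--         heap = _merge(heap[2], heap[3])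
--         b = heap[1]
--         heap = _merge(heap[2], heap[3])
--         heap = _merge(heap, (1, a + 2 * b, None, None))
--         n -= 1
--         answer += 1
--     if heap[1] < K:
--         return -1
--     return answer
-- ===== Notes on version B (the rewrite author's own statement) =====
-- stated objective: faster
-- what changed: B replaces A's slice-two/append/full-re-sort of a Python list per merge with a hand-written leftist min-heap (a persistent tuple tree): build by n melds, then each merge is two O(log n) pops and one O(log n) meld, no sorting inside the loop.
-- outside the precondition, e.g. on solution([], 0): A raises IndexError, B raises TypeError
import Mathlib
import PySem

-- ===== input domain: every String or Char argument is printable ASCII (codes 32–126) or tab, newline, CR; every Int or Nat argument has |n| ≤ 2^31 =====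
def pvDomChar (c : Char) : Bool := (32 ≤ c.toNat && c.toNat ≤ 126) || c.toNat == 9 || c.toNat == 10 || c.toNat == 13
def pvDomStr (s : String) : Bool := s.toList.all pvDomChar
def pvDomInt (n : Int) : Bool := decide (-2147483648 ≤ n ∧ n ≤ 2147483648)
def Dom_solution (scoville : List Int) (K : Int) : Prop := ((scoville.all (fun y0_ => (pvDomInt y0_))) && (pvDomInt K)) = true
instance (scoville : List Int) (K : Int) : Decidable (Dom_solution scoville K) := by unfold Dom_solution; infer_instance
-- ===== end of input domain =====

-- B replaces A's append-then-full-re-sort per merge with a hand-written leftist min-heap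
-- (a persistent tuple tree); objective: faster. Equivalence is about the RETURN value only:
-- Python A sorts its argument list in place; B does not mutate it.

-- ===== PORT A =====
-- the 'if scoville[0] < K ... return' epilogue; Python raises IndexError on [],
-- which Pre_solution excludes (the none branch's value is never claimed)
def solution_finA (l : List Int) (K answer : Int) : Int :=
  match PySem.List.pyGet? l 0 with
  | none => -1
  | some x => if x < K then -1 else answer

def solution_loopA (l : List Int) (K answer : Int) : Int :=
  match l with
  | min1 :: min2 :: rest =>
    if min1 < K then
      solution_loopA (PySem.List.sorted (rest ++ [min1 + min2 * 2]) (fun x => x) false) K (answer + 1)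
    else solution_finA (min1 :: min2 :: rest) K answer
  | _ => solution_finA l K answer
termination_by l.length
decreasing_by simp [PySem.List.length_sorted]

def solution (scoville : List Int) (K : Int) : Int :=
  solution_loopA (PySem.List.sorted scoville (fun x => x) false) K 0

-- ===== PORT B =====
-- Python's heap nodes are tuples (rank, value, left, right), None = empty tree
inductive HTree where
  | leaf : HTree
  | node : Int → Int → HTree → HTree → HTree
deriving DecidableEq, Repr

-- _rank: t[0] if t is not None else 0
def htRank : HTree → Int
  | .leaf => 0
  | .node r _ _ _ => r

def htSize : HTree → Nat
  | .leaf => 0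
  | .node _ _ l r => htSize l + htSize r + 1

-- _merge of Source B, step for step (the 'a, b = b, a' swap becomes the first branch)
def htMerge : HTree → HTree → HTree
  | .leaf, b => b
  | .node ra va la ta, .leaf => .node ra va la ta
  | .node ra va la ta, .node rb vb lb tb =>
    if vb < va then
      let left := lb
      let right := htMerge tb (.node ra va la ta)
      if htRank right ≤ htRank left then .node (htRank right + 1) vb left right
      else .node (htRank left + 1) vb right left
    else
      let left := la
      let right := htMerge ta (.node rb vb lb tb)
      if htRank right ≤ htRank left then .node (htRank right + 1) va left right
      else .node (htRank left + 1) va right left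
termination_by a b => htSize a + htSize b
decreasing_by all_goals (simp [htSize]; try omega)

-- heap[1]; none = the Python TypeError/IndexError on an empty heap (outside Pre_)
def htTop : HTree → Option Int
  | .leaf => none
  | .node _ v _ _ => some v

-- the 'if heap[1] < K: return -1 / return answer' epilogue of Source B
def solution_finB (t : HTree) (K answer : Int) : Int :=
  match htTop t with
  | none => -1
  | some x => if x < K then -1 else answer

-- the while loop of Source B; the leaf fallbacks are unreachable for a heap of size n
def solution_loopB (n : Nat) (t : HTree) (K answer : Int) : Int :=
  if 2 ≤ n then
    match t with
    | .leaf => -1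
    | .node _ a l r =>
      if a < K then
        match htMerge l r with
        | .leaf => -1
        | .node _ b l1 r1 =>
          solution_loopB (n - 1)
            (htMerge (htMerge l1 r1) (.node 1 (a + 2 * b) .leaf .leaf)) K (answer + 1)
      else solution_finB (.node 0 a l r) K answer
  else solution_finB t K answer
termination_by n
decreasing_by omega

def solution_alt (scoville : List Int) (K : Int) : Int :=
  solution_loopB scoville.length
    (scoville.foldl (fun h x => htMerge h (.node 1 x .leaf .leaf)) .leaf) K 0

-- ===== PRECONDITION & SPEC =====
-- Pre_ excludes only the empty list, on which Python A raises IndexError (B raises TypeError)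
def Pre_solution (scoville : List Int) (K : Int) : Prop := scoville ≠ []
instance (scoville : List Int) (K : Int) : Decidable (Pre_solution scoville K) := by unfold Pre_solution; infer_instance
def pvWitness_solution : List Int × Int := ([1, 2, 9], 7)

def Spec_solution (scoville : List Int) (K : Int) (out : Int) : Prop := out = solution_alt scoville K
instance (scoville : List Int) (K : Int) (out : Int) : Decidable (Spec_solution scoville K out) := by unfold Spec_solution; infer_instance

-- ===== CLAIM (what is proved, stated in full; the proofs are below) =====
def Claim_equal_solution : Prop := ∀ (scoville : List Int) (K : Int), Dom_solution scoville K → Pre_solution scoville K → Spec_solution scoville K (solution scoville K)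

-- ===== LEMMAS AND PROOFS =====

def htMS : HTree → Multiset Int
  | .leaf => 0
  | .node _ v l r => v ::ₘ (htMS l + htMS r)

def IsHeap : HTree → Prop
  | .leaf => True
  | .node _ v l r => IsHeap l ∧ IsHeap r ∧ ∀ x ∈ htMS l + htMS r, v ≤ x

theorem htMerge_ms (a b : HTree) : htMS (htMerge a b) = htMS a + htMS b := by
  fun_induction htMerge a b with
  | case1 b => simp [htMS]
  | case2 => simp [htMS]
  | case3 ra va la ta rb vb lb tb hlt left right hrk ih
  | case4 ra va la ta rb vb lb tb hlt left right hrk ih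
  | case5 ra va la ta rb vb lb tb hlt left right hrk ih
  | case6 ra va la ta rb vb lb tb hlt left right hrk ih =>
    simp only [htMS, ih, left, right]
    simp only [← Multiset.singleton_add]
    abel

theorem isHeap_root_min {r v : Int} {l t : HTree} (h : IsHeap (.node r v l t)) :
    ∀ x ∈ htMS (.node r v l t), v ≤ x := by
  intro x hx
  simp only [htMS, Multiset.mem_cons] at hx
  rcases hx with rfl | hx
  · exact le_refl x
  · exact h.2.2 x hx

theorem htMerge_isHeap : ∀ (a b : HTree), IsHeap a → IsHeap b → IsHeap (htMerge a b) := by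
  intro a b
  fun_induction htMerge a b with
  | case1 b => intro _ hb; exact hb
  | case2 => intro ha _; exact ha
  | case3 ra va la ta rb vb lb tb hlt left right hrk ih
  | case4 ra va la ta rb vb lb tb hlt left right hrk ih =>
    intro ha hb
    obtain ⟨hlb, htb, hvb⟩ := hb
    have hrec := ih htb ha
    have hmem : ∀ x ∈ htMS lb + htMS (htMerge tb (HTree.node ra va la ta)), vb ≤ x := by
      intro x hx
      rw [htMerge_ms] at hx
      simp only [Multiset.mem_add] at hx
      rcases hx with hx | hx | hx
      · exact hvb x (Multiset.mem_add.mpr (Or.inl hx))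
      · exact hvb x (Multiset.mem_add.mpr (Or.inr hx))
      · exact le_trans (le_of_lt hlt) (isHeap_root_min ha x hx)
    first
    | exact ⟨hlb, hrec, hmem⟩
    | exact ⟨hrec, hlb, fun x hx => hmem x (by rwa [Multiset.add_comm] at hx)⟩
  | case5 ra va la ta rb vb lb tb hlt left right hrk ih
  | case6 ra va la ta rb vb lb tb hlt left right hrk ih =>
    intro ha hb
    obtain ⟨hla, hta, hva⟩ := ha
    have hrec := ih hta hb
    have hmem : ∀ x ∈ htMS la + htMS (htMerge ta (HTree.node rb vb lb tb)), va ≤ x := by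
      intro x hx
      rw [htMerge_ms] at hx
      simp only [Multiset.mem_add] at hx
      rcases hx with hx | hx | hx
      · exact hva x (Multiset.mem_add.mpr (Or.inl hx))
      · exact hva x (Multiset.mem_add.mpr (Or.inr hx))
      · exact le_trans (not_lt.mp hlt) (isHeap_root_min hb x hx)
    first
    | exact ⟨hla, hrec, hmem⟩
    | exact ⟨hrec, hla, fun x hx => hmem x (by rwa [Multiset.add_comm] at hx)⟩

-- a sorted list and a heap over the same multiset expose the same minimum at the front
theorem top_eq {a : Int} {l' : List Int} {t : HTree}
    (hms : (↑(a :: l') : Multiset Int) = htMS t) (ht : IsHeap t)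
    (hp : (a :: l').Pairwise (· ≤ ·)) :
    ∃ rk ls rs, t = .node rk a ls rs := by
  match t with
  | .leaf => simp [htMS] at hms
  | .node rk v ls rs =>
    suffices hva : v = a by exact ⟨rk, ls, rs, by rw [hva]⟩
    have hv_mem : v ∈ (↑(a :: l') : Multiset Int) := by
      rw [hms]; simp [htMS]
    have ha_mem : a ∈ htMS (.node rk v ls rs) := by
      rw [← hms]; simp
    have h1 : a ≤ v := by
      rcases (by simpa using hv_mem : v = a ∨ v ∈ l') with rfl | hv
      · exact le_refl _
      · exact (List.pairwise_cons.mp hp).1 v hv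
    have h2 : v ≤ a := isHeap_root_min ht a ha_mem
    omega

theorem sorted_id_pairwise (xs : List Int) :
    (PySem.List.sorted xs (fun x => x) false).Pairwise (· ≤ ·) := by
  simpa using PySem.List.sorted_pairwise xs (fun x : Int => x)

theorem loop_eq : ∀ (n : ℕ) (l : List Int) (t : HTree), l.length = n →
    l.Pairwise (· ≤ ·) → IsHeap t → (↑l : Multiset Int) = htMS t →
    ∀ (K answer : Int), solution_loopA l K answer = solution_loopB n t K answer := by
  intro n
  induction n with
  | zero =>
    intro l t hl _ _ hms K answer
    rw [List.length_eq_zero_iff.mp hl] at hms ⊢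
    match t, hms with
    | .leaf, _ =>
      simp [solution_loopA, solution_loopB, solution_finA, solution_finB, htTop,
        PySem.List.pyGet?, PySem.List.pyIdx?]
    | .node rk v ls rs, hms => simp [htMS] at hms
  | succ m ih =>
    intro l t hl hp ht hms K answer
    match l, hl with
    | [x], hl =>
      obtain ⟨rk, ls, rs, rfl⟩ := top_eq hms ht hp
      have hm : m = 0 := by simpa using hl
      subst hm
      simp [solution_loopA, solution_loopB, solution_finA, solution_finB, htTop,
        PySem.List.pyGet?, PySem.List.pyIdx?]
    | a :: b :: rest, hl =>
      obtain ⟨rk, ls, rs, rfl⟩ := top_eq hms ht hp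
      have h2m : 2 ≤ m + 1 := by simp at hl; omega
      rw [solution_loopA, solution_loopB, if_pos h2m]
      by_cases hK : a < K
      · rw [if_pos hK, if_pos hK]
        -- first pop
        have hms1 : (↑(b :: rest) : Multiset Int) = htMS (htMerge ls rs) := by
          rw [htMerge_ms]
          exact (Multiset.cons_inj_right a).mp (by simpa [htMS] using hms)
        have hp1 : (b :: rest).Pairwise (· ≤ ·) := (List.pairwise_cons.mp hp).2
        have ht1 : IsHeap (htMerge ls rs) := htMerge_isHeap _ _ ht.1 ht.2.1
        obtain ⟨rk1, l1, r1, heq1⟩ := top_eq hms1 ht1 hp1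
        rw [heq1]
        -- second pop
        have hms2 : (↑rest : Multiset Int) = htMS (htMerge l1 r1) := by
          rw [htMerge_ms]
          rw [heq1] at hms1
          exact (Multiset.cons_inj_right b).mp (by simpa [htMS] using hms1)
        have ht2 : IsHeap (htMerge l1 r1) := by
          rw [heq1] at ht1; exact htMerge_isHeap _ _ ht1.1 ht1.2.1
        -- next states agree
        have hlen : (PySem.List.sorted (rest ++ [a + b * 2]) (fun x => x) false).length = m := by
          rw [PySem.List.length_sorted]; simp at hl ⊢; omega
        refine ih _ _ hlen (sorted_id_pairwise _) ?_ ?_ K (answer + 1)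
        · exact htMerge_isHeap _ _ ht2 ⟨trivial, trivial, by simp [htMS]⟩
        · rw [htMerge_ms, ← hms2]
          have hperm := PySem.List.sorted_perm (xs := rest ++ [a + b * 2])
            (key := fun x : Int => x) (rev := false)
          rw [Multiset.coe_eq_coe.mpr hperm]
          have hab : a + b * 2 = a + 2 * b := by ring
          simp only [htMS, hab, ← Multiset.cons_coe, ← Multiset.coe_add,
            ← Multiset.singleton_add]
          abel
      · rw [if_neg hK, if_neg hK]
        have h0 : (0 : Int) ≤ (rest.length : Int) + 1 := by positivity
        simp [solution_finA, solution_finB, htTop, PySem.List.pyGet?,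
          PySem.List.pyIdx?, h0]
    | [], hl => simp at hl

theorem build_invariant (scoville : List Int) :
    IsHeap (scoville.foldl (fun h x => htMerge h (.node 1 x .leaf .leaf)) .leaf) ∧
    htMS (scoville.foldl (fun h x => htMerge h (.node 1 x .leaf .leaf)) .leaf) =
      (↑scoville : Multiset Int) := by
  suffices h : ∀ (t : HTree), IsHeap t →
      IsHeap (scoville.foldl (fun h x => htMerge h (.node 1 x .leaf .leaf)) t) ∧
      htMS (scoville.foldl (fun h x => htMerge h (.node 1 x .leaf .leaf)) t) =
        htMS t + (↑scoville : Multiset Int) by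
    have := h .leaf trivial
    simpa [htMS] using this
  induction scoville with
  | nil => intro t ht; simp [ht]
  | cons x xs ihx =>
    intro t ht
    have hx : IsHeap (htMerge t (.node 1 x .leaf .leaf)) :=
      htMerge_isHeap _ _ ht ⟨trivial, trivial, by simp [htMS]⟩
    obtain ⟨h1, h2⟩ := ihx (htMerge t (.node 1 x .leaf .leaf)) hx
    refine ⟨by simpa using h1, ?_⟩
    simp only [List.foldl_cons]
    rw [h2, htMerge_ms]
    simp only [htMS, ← Multiset.cons_coe, ← Multiset.singleton_add]
    abel

-- ===== VERDICT (by name: the statement is the Claim_ definition above) =====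
theorem solution_spec : Claim_equal_solution := by
  intro scoville K _ _
  unfold Spec_solution solution solution_alt
  obtain ⟨hheap, hms⟩ := build_invariant scoville
  refine loop_eq scoville.length _ _ ?_ (sorted_id_pairwise scoville) hheap ?_ K 0
  · rw [PySem.List.length_sorted]
  · rw [Multiset.coe_eq_coe.mpr
      (PySem.List.sorted_perm scoville (fun x : Int => x) false), hms]
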